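-- pv_equiv track=rewrite | github.com/bgtor/ansible-portainer | plugins/module_utils/portainer_module.py | _sanitize_for_diff
-- ===== SOURCE A (Python) =====
-- import copy
--
-- def _sanitize_for_diff(
--     data: dict | None = None, skip_fields: list[str] | None = None
-- ) -> dict:
--
--     if not data:
--         return {}
--
--     skip_fields = skip_fields or []
--
--     sanitized = copy.deepcopy(data)
--
--     for k in skip_fields:
--         sanitized.pop(k, None)
--
--     return sanitized
-- ===== SOURCE B (Python) =====
-- import copy
--
--
-- def _sanitize_for_diff(
--     data: dict | None = None, skip_fields: list[str] | None = None
-- ) -> dict: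
--
--     if not data:
--         return {}
--
--     skip = set(skip_fields or [])
--
--     return {k: copy.deepcopy(v) for k, v in data.items() if k not in skip}
-- ===== Notes on version B (the rewrite author's own statement) =====
-- stated objective: simpler
-- what changed: Replaces A's deepcopy-whole-dict-then-pop-each-skip-key loop with a single comprehension that filters the items against a set of skip keys while copying.
import Mathlib
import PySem

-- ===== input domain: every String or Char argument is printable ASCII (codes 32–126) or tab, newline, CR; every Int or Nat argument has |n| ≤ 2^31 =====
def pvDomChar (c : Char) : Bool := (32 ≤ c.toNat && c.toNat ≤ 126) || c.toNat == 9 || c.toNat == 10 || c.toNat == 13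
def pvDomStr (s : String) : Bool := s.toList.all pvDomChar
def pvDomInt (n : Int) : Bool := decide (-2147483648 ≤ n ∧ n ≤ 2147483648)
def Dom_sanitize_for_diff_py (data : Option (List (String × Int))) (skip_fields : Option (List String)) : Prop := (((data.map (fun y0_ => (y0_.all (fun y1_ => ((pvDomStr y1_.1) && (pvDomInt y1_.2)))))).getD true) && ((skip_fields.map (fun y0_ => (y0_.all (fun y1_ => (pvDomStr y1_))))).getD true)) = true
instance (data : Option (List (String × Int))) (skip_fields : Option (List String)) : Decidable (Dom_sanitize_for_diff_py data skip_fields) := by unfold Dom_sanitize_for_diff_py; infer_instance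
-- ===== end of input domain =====

-- ===== PORT A =====
-- B changes: one filtering comprehension over the items instead of deepcopy-then-pop loop (objective: simpler).
-- Equivalence is about the RETURN value; neither version mutates its arguments.

-- dict.pop(k, None): remove the entry with key k (a Python dict has one entry per key).
def pvDictPopDiscard (xs : List (String × Int)) (k : String) : List (String × Int) :=
  xs.filter (fun kv => kv.1 != k)

def sanitize_for_diff_py (data : Option (List (String × Int))) (skip_fields : Option (List String)) : List (String × Int) :=
  match data with
  | none => []
  | some d =>
    if d = [] then []                      -- `if not data: return {}`
    else
      let sk := skip_fields.getD []        -- `skip_fields = skip_fields or []`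
      let sanitized := d                   -- deepcopy: values are Ints, the copy equals the original
      sk.foldl (fun s k => pvDictPopDiscard s k) sanitized

-- ===== PORT B =====
def sanitize_for_diff_py_alt (data : Option (List (String × Int))) (skip_fields : Option (List String)) : List (String × Int) :=
  match data with
  | none => []
  | some d =>
    if d = [] then []                      -- `if not data: return {}`
    else
      let skip : PySem.Set String := PySem.Set.ofList (skip_fields.getD [])
      d.filter (fun kv => !skip.contains kv.1)

-- ===== PRECONDITION & SPEC =====
def Spec_sanitize_for_diff_py (data : Option (List (String × Int))) (skip_fields : Option (List String)) (out : List (String × Int)) : Prop := out = sanitize_for_diff_py_alt data skip_fields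
instance (data : Option (List (String × Int))) (skip_fields : Option (List String)) (out : List (String × Int)) : Decidable (Spec_sanitize_for_diff_py data skip_fields out) := by unfold Spec_sanitize_for_diff_py; infer_instance

-- ===== CLAIM (what is proved, stated in full; the proofs are below) =====
def Claim_equal_sanitize_for_diff_py : Prop := ∀ (data : Option (List (String × Int))) (skip_fields : Option (List String)), Dom_sanitize_for_diff_py data skip_fields → Spec_sanitize_for_diff_py data skip_fields (sanitize_for_diff_py data skip_fields)

-- ===== LEMMAS AND PROOFS =====

-- popping each skip key in turn leaves exactly the entries whose key is in none of them
theorem foldl_pop_eq_filter (sk : List String) (d : List (String × Int)) :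
    sk.foldl (fun s k => pvDictPopDiscard s k) d
      = d.filter (fun kv => !sk.contains kv.1) := by
  induction sk generalizing d with
  | nil => simp
  | cons k sk' ih =>
    rw [List.foldl_cons, ih, pvDictPopDiscard]
    rw [List.filter_filter]
    apply List.filter_congr
    intro kv _
    by_cases h : kv.1 = k <;> simp [h]

-- membership in set(skip_fields) coincides with membership in the list
theorem contains_ofList (l : List String) (x : String) :
    (PySem.Set.ofList l).contains x = l.contains x := by
  simp [PySem.Set.mem_ofList]

-- ===== VERDICT (by name: the statement is the Claim_ definition above) =====
theorem sanitize_for_diff_py_spec : Claim_equal_sanitize_for_diff_py := by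
  intro data skip_fields _
  unfold Spec_sanitize_for_diff_py sanitize_for_diff_py sanitize_for_diff_py_alt
  cases data with
  | none => rfl
  | some d =>
    by_cases hd : d = []
    · simp [hd]
    · simp only [hd, foldl_pop_eq_filter]
      apply List.filter_congr
      intro kv _
      rw [contains_ofList]
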